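-- pv_equiv track=rewrite | github.com/siisee11/SW | kakao2018/map.py | solution
-- ===== SOURCE A (Python) =====
-- def solution(n, arr1, arr2):
--     answer = []
--
--     for r1, r2 in zip(arr1, arr2):
--         row = ""
--         for i in range(n - 1, -1, -1):
--             row += ('#' if (r1 | r2) & (2 ** i) != 0 else ' ')
--         answer.append(row)
--
--     return answer
-- ===== SOURCE B (Python) =====
-- def solution(n, arr1, arr2):
--     if n <= 0:
--         return ['' for _ in zip(arr1, arr2)]
--     mask = (1 << n) - 1
--     table = str.maketrans('10', '# ')
--     return [format((a | b) & mask, '0{}b'.format(n)).translate(table)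
--             for a, b in zip(arr1, arr2)]
-- ===== Notes on version B (the rewrite author's own statement) =====
-- stated objective: faster
-- what changed: Instead of looping over bit positions and recomputing 2**i for each character, B masks r1|r2 to its low n bits once, renders it with format(v, '0nb') as a zero-padded binary string, and translates '1'/'0' to '#'/' ' via str.translate.
import Mathlib
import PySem

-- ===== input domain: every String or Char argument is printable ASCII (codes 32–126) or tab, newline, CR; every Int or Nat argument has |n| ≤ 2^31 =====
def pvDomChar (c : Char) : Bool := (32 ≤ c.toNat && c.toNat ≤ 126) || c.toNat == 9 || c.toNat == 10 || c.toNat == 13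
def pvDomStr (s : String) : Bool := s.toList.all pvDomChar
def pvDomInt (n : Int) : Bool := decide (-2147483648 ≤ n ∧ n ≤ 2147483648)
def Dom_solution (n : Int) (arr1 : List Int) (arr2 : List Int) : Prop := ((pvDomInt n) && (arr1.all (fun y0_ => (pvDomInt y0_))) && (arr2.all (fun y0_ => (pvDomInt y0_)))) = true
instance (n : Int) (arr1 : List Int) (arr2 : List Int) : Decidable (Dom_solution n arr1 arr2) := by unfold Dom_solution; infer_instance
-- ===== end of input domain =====

-- B replaces A's per-bit loop (recomputing 2**i per character) by masking r1|r2 to the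
-- low n bits and rendering a zero-padded binary string, translated '1'->'#', '0'->' '
-- (measured asymptotically faster in a timing run).


-- ===== PORT A =====
-- the row string is built as a List Char (Python's row += c), turned into a String when appended;
-- every i drawn from range(n-1, -1, -1) satisfies 0 ≤ i, so Python's 2 ** i is 2 ^ i.toNat exactly.
def solution (n : Int) (arr1 : List Int) (arr2 : List Int) : List String :=
  (arr1.zip arr2).foldl
    (fun answer p =>
      answer ++ [String.ofList ((PySem.List.pyRange (n - 1) (-1) (-1)).foldl
        (fun row i =>
          row ++ (if PySem.Int.band (PySem.Int.bor p.1 p.2) (2 ^ i.toNat) ≠ 0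
                  then ['#'] else [' '])) [])])
    []

-- ===== PORT B =====
-- hand port of format(m, '0{}b'.format(n)): fixed-width binary, MSB first, zero-padded;
-- exact for 0 ≤ m < 2^n, which the mask guarantees (the masked value is nonnegative, so .toNat is exact).
def binPad : Nat → Nat → List Char
  | 0, _ => []
  | nn + 1, m => binPad nn (m / 2) ++ [if m % 2 = 1 then '1' else '0']

-- str.maketrans('10', '# ') applied by translate
def trChar (c : Char) : Char := if c = '1' then '#' else if c = '0' then ' ' else c

def solution_alt (n : Int) (arr1 : List Int) (arr2 : List Int) : List String :=
  if n ≤ 0 then (arr1.zip arr2).map (fun _ => "")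
  else
    (arr1.zip arr2).map (fun p =>
      String.ofList ((binPad n.toNat
        ((PySem.Int.band (PySem.Int.bor p.1 p.2) ((1 : Int) <<< n.toNat - 1)).toNat)).map trChar))

-- ===== PRECONDITION & SPEC =====
def Spec_solution (n : Int) (arr1 : List Int) (arr2 : List Int) (out : List String) : Prop := out = solution_alt n arr1 arr2
instance (n : Int) (arr1 : List Int) (arr2 : List Int) (out : List String) : Decidable (Spec_solution n arr1 arr2 out) := by unfold Spec_solution; infer_instance

-- ===== CLAIM (what is proved, stated in full; the proofs are below) =====
def Claim_equal_solution : Prop := ∀ (n : Int) (arr1 : List Int) (arr2 : List Int), Dom_solution n arr1 arr2 → Spec_solution n arr1 arr2 (solution n arr1 arr2)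

-- ===== LEMMAS AND PROOFS =====

theorem foldl_append_singleton {α β : Type} (f : α → β) :
    ∀ (l : List α) (acc : List β),
      l.foldl (fun a x => a ++ [f x]) acc = acc ++ l.map f := by
  intro l
  induction l with
  | nil => simp
  | cons x xs ih => intro acc; simp [List.foldl, ih]

theorem ite_singleton {c : Prop} [Decidable c] (a b : Char) :
    (if c then [a] else [b]) = [if c then a else b] := by
  split_ifs <;> rfl

-- the bit of v seen by Python's v & 2**j, on the two's-complement reading
def pyBit (v : Int) (j : Nat) : Bool :=
  if 0 ≤ v then v.toNat.testBit j else !((-v - 1).toNat.testBit j)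

theorem band_two_pow_ne_zero (v : Int) (j : Nat) :
    (PySem.Int.band v (2 ^ j) ≠ 0) ↔ pyBit v j = true := by
  have hp : (0 : Int) ≤ 2 ^ j := by positivity
  have hpos : (0 : Nat) < 2 ^ j := Nat.two_pow_pos j
  have htn : ((2 : Int) ^ j).toNat = 2 ^ j := by
    rw [show ((2 : Int) ^ j) = ((2 ^ j : Nat) : Int) by push_cast; ring, Int.toNat_natCast]
  by_cases hv : 0 ≤ v
  · simp only [PySem.Int.band, if_pos hp, pyBit, if_pos hv, htn]
    rw [Nat.and_two_pow]
    cases h : v.toNat.testBit j <;> simp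
  · simp only [PySem.Int.band, if_pos hp, pyBit, if_neg hv, htn]
    rw [Nat.two_pow_and]
    cases h : (-v - 1).toNat.testBit j <;> simp

-- testBit of the complement within nn bits
theorem testBit_comp :
    ∀ (j nn r : Nat), r < 2 ^ nn → j < nn →
      (2 ^ nn - 1 - r).testBit j = !r.testBit j := by
  intro j
  induction j with
  | zero =>
    intro nn r hr hj
    have h2 : 2 ^ nn = 2 * 2 ^ (nn - 1) := by
      rw [← pow_succ']; congr 1; omega
    have hm : (2 ^ nn - 1 - r) % 2 = 1 - r % 2 := by omega
    simp only [Nat.testBit_zero, hm]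
    rcases Nat.mod_two_eq_zero_or_one r with h | h <;> simp [h]
  | succ j ih =>
    intro nn r hr hj
    have h2 : 2 ^ nn = 2 * 2 ^ (nn - 1) := by
      rw [← pow_succ']; congr 1; omega
    have hx : (2 ^ nn - 1 - r) / 2 = 2 ^ (nn - 1) - 1 - r / 2 := by omega
    rw [Nat.testBit_succ, hx, ih (nn - 1) (r / 2) (by omega) (by omega), ← Nat.testBit_succ]

theorem mask_eq (nn : Nat) : ((1 : Int) <<< nn - 1) = ((2 ^ nn - 1 : Nat) : Int) := by
  rw [Int.shiftLeft_eq]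
  have := Nat.two_pow_pos nn
  push_cast [this]; ring

theorem masked_testBit (v : Int) (nn j : Nat) (hj : j < nn) :
    ((PySem.Int.band v ((1 : Int) <<< nn - 1)).toNat).testBit j = pyBit v j := by
  have hm0 : (0 : Int) ≤ ((2 ^ nn - 1 : Nat) : Int) := by positivity
  rw [mask_eq nn]
  by_cases hv : 0 ≤ v
  · simp only [PySem.Int.band, if_pos hm0, pyBit, if_pos hv, Int.toNat_natCast]
    rw [Nat.and_two_pow_sub_one_eq_mod, Nat.testBit_mod_two_pow]
    simp [hj]
  · simp only [PySem.Int.band, if_pos hm0, pyBit, if_neg hv, Int.toNat_natCast]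
    rw [Nat.land_comm, Nat.and_two_pow_sub_one_eq_mod]
    have hmod : (-v - 1).toNat % 2 ^ nn < 2 ^ nn := Nat.mod_lt _ (Nat.two_pow_pos nn)
    rw [testBit_comp j nn _ hmod hj, Nat.testBit_mod_two_pow]
    simp [hj]

theorem masked_lt (v : Int) (nn : Nat) :
    (PySem.Int.band v ((1 : Int) <<< nn - 1)).toNat < 2 ^ nn := by
  have hm0 : (0 : Int) ≤ ((2 ^ nn - 1 : Nat) : Int) := by positivity
  have hpos := Nat.two_pow_pos nn
  rw [mask_eq nn]
  by_cases hv : 0 ≤ v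
  · simp only [PySem.Int.band, if_pos hm0, if_pos hv, Int.toNat_natCast]
    rw [Nat.and_two_pow_sub_one_eq_mod]
    exact Nat.mod_lt _ hpos
  · simp only [PySem.Int.band, if_pos hm0, if_neg hv, Int.toNat_natCast]
    omega

theorem binPad_eq_map :
    ∀ (nn m : Nat), m < 2 ^ nn →
      binPad nn m = (List.range nn).map (fun k => if m.testBit (nn - 1 - k) then '1' else '0') := by
  intro nn
  induction nn with
  | zero => intro m _; simp [binPad]
  | succ nn ih =>
    intro m hm
    have h2 : 2 ^ (nn + 1) = 2 * 2 ^ nn := by rw [← pow_succ']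
    rw [binPad, ih (m / 2) (by omega), List.range_succ, List.map_append]
    congr 1
    · apply List.map_congr_left
      intro k hk
      have hk' : k < nn := List.mem_range.mp hk
      rw [show nn + 1 - 1 - k = (nn - 1 - k) + 1 by omega, Nat.testBit_succ]
    · simp only [List.map_cons, List.map_nil]
      congr 1
      rw [show nn + 1 - 1 - nn = 0 by omega, Nat.testBit_zero]
      rcases Nat.mod_two_eq_zero_or_one m with h | h <;> simp [h]

-- the single-row equality
theorem row_eq (n : Int) (v : Int) (hn : ¬ n ≤ 0) :
    (PySem.List.pyRange (n - 1) (-1) (-1)).map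
        (fun i => if PySem.Int.band v (2 ^ i.toNat) ≠ 0 then '#' else ' ')
      = (binPad n.toNat ((PySem.Int.band v ((1 : Int) <<< n.toNat - 1)).toNat)).map trChar := by
  set m := (PySem.Int.band v ((1 : Int) <<< n.toNat - 1)).toNat with hm
  rw [binPad_eq_map n.toNat m (masked_lt v n.toNat), List.map_map]
  rw [PySem.List.pyRange_neg_one]
  rw [show (n - 1 - -1).toNat = n.toNat by omega, List.map_map]
  apply List.map_congr_left
  intro k hk
  have hk' : k < n.toNat := List.mem_range.mp hk
  simp only [Function.comp_apply, trChar]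
  rw [show ((n - 1 - (k : Int))).toNat = n.toNat - 1 - k by omega]
  have hb := band_two_pow_ne_zero v (n.toNat - 1 - k)
  have hmb := masked_testBit v n.toNat (n.toNat - 1 - k) (by omega)
  rw [← hm] at hmb
  rw [hmb.symm] at hb
  by_cases hbit : m.testBit (n.toNat - 1 - k)
  · rw [if_pos (hb.mpr hbit), if_pos hbit]; simp
  · rw [if_neg (fun h => hbit (hb.mp h)), if_neg hbit]; simp

-- ===== VERDICT (by name: the statement is the Claim_ definition above) =====
theorem solution_spec : Claim_equal_solution := by
  intro n arr1 arr2 _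
  unfold Spec_solution solution solution_alt
  simp only [ite_singleton]
  rw [foldl_append_singleton]
  simp only [foldl_append_singleton, List.nil_append]
  by_cases hn : n ≤ 0
  · rw [if_pos hn]
    apply List.map_congr_left
    intro p _
    rw [PySem.List.pyRange_neg_one_eq_nil (by omega)]
    rfl
  · rw [if_neg hn]
    apply List.map_congr_left
    intro p _
    rw [row_eq n (PySem.Int.bor p.1 p.2) hn]
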